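-- pv_equiv track=rewrite | github.com/jaeminSon/problem_solving | baekjoon/정확해.py | solve
-- ===== SOURCE A (Python) =====
-- def solve(X, N):
--     s = 0
--
--     i=2
--     while i<=X:
--         j = X//(X//i)
--         s+=(X//i-1)*(j-i+1)
--         i = j+1
--
--     i=2
--     while i**N <= X:
--         s-=(X//(i**N))
--         i += 1
--
--     return s
-- ===== SOURCE B (Python) =====
-- def solve(X, N):
--     m = 1
--     while (m + 1) * (m + 1) <= X:
--         m += 1
--     s = 2 * sum(X // a - 1 for a in range(2, m + 1)) - (m - 1) ** 2
--     i = 2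
--     while i ** N <= X:
--         s -= X // (i ** N)
--         i += 1
--     return s
-- ===== Notes on version B (the rewrite author's own statement) =====
-- stated objective: alternative
-- what changed: A's divisor-block while-loop (jumping over maximal blocks of constant X//i) is replaced by the hyperbola-symmetry closed form: count lattice points a*b <= X with a,b >= 2 as twice the sum of X//a - 1 for a up to isqrt(X) minus (isqrt(X)-1)^2 (isqrt computed by a simple increment loop); the perfect-power subtraction loop is kept. Pre_ excludes only inputs on which A diverges (N <= 0 with X >= 1 makes the second loop's condition i**N <= X hold forever).
import Mathlib
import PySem

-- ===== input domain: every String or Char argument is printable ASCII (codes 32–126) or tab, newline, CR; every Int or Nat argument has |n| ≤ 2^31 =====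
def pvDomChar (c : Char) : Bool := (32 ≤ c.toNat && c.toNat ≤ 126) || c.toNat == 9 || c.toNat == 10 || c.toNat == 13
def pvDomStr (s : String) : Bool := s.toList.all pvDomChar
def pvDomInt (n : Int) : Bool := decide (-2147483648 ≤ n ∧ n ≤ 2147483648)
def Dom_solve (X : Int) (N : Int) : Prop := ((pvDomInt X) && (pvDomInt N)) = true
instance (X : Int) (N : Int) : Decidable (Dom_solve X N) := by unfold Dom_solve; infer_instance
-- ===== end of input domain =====

-- B replaces A's divisor-block while-loop by the hyperbola-symmetry closed form
-- 2 * sum_{2 ≤ a ≤ isqrt(X)} (X//a - 1) - (isqrt(X)-1)^2; the perfect-power loop is unchanged.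

-- ===== PORT A =====
-- first while-loop of A: block decomposition over equal quotients (fuel makes the recursion total)
def solveLoop1 : Nat → Int → Int → Int → Int
  | 0, _, _, s => s
  | fuel+1, X, i, s =>
    if i ≤ X then
      let j := PySem.Int.floordiv X (PySem.Int.floordiv X i)
      solveLoop1 fuel X (j+1) (s + (PySem.Int.floordiv X i - 1) * (j - i + 1))
    else s

-- second while-loop of A: subtract X // i**N while i**N <= X (fuel makes the recursion total;
-- inside Pre_solve the loop ends before the fuel does; i**N is ported as i ^ N.toNat, exact for N ≥ 0)
def solveLoop2 : Nat → Int → Int → Int → Int → Int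
  | 0, _, _, _, s => s
  | fuel+1, X, N, i, s =>
    if i ^ N.toNat ≤ X then solveLoop2 fuel X N (i+1) (s - PySem.Int.floordiv X (i ^ N.toNat))
    else s

def solve (X : Int) (N : Int) : Int :=
  solveLoop2 (X+1).toNat X N 2 (solveLoop1 (X+1).toNat X 2 0)

-- ===== PORT B =====
-- B's integer-square-root increment loop: while (m+1)*(m+1) <= X: m += 1 (fuel makes it total)
def solveAltSqrt : Nat → Int → Int → Int
  | 0, _, m => m
  | fuel+1, X, m => if (m+1)*(m+1) ≤ X then solveAltSqrt fuel X (m+1) else m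

-- B's second while-loop (identical Python text to A's second loop)
def solveAltLoop2 : Nat → Int → Int → Int → Int → Int
  | 0, _, _, _, s => s
  | fuel+1, X, N, i, s =>
    if i ^ N.toNat ≤ X then solveAltLoop2 fuel X N (i+1) (s - PySem.Int.floordiv X (i ^ N.toNat))
    else s

def solve_alt (X : Int) (N : Int) : Int :=
  let m := solveAltSqrt (X.toNat+1) X 1
  let s := 2 * ((PySem.List.pyRange 2 (m+1) 1).foldl
      (fun acc a => acc + (PySem.Int.floordiv X a - 1)) 0) - (m-1)^2
  solveAltLoop2 (X+1).toNat X N 2 s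

-- ===== PRECONDITION & SPEC =====
-- Pre_ excludes only the inputs on which the Python A never returns: for N ≤ 0 and X ≥ 1
-- the condition i**N <= X of the second loop holds forever (for N < 0, i**N is a positive
-- float shrinking towards 0), so A diverges there.
def Pre_solve (X : Int) (N : Int) : Prop := 1 ≤ N ∨ X ≤ 0
instance (X : Int) (N : Int) : Decidable (Pre_solve X N) := by unfold Pre_solve; infer_instance
def pvWitness_solve : Int × Int := (100, 2)

def Spec_solve (X : Int) (N : Int) (out : Int) : Prop := out = solve_alt X N
instance (X : Int) (N : Int) (out : Int) : Decidable (Spec_solve X N out) := by unfold Spec_solve; infer_instance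

-- ===== CLAIM (what is proved, stated in full; the proofs are below) =====
def Claim_equal_solve : Prop := ∀ (X : Int) (N : Int), Dom_solve X N → Pre_solve X N → Spec_solve X N (solve X N)

-- ===== LEMMAS AND PROOFS =====

-- the two second loops have identical bodies
theorem loop2_eq (fuel : Nat) (X N i s : Int) :
    solveLoop2 fuel X N i s = solveAltLoop2 fuel X N i s := by
  induction fuel generalizing i s with
  | zero => rfl
  | succ f ih =>
    simp only [solveLoop2, solveAltLoop2]
    split_ifs with h
    · exact ih _ _
    · rfl

-- in a quotient block i ≤ k ≤ X//(X//i), the quotient X//k is constant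
theorem floordiv_const_block (X i k : Int) (h2 : 2 ≤ i) (hiX : i ≤ X)
    (hik : i ≤ k) (hkj : k ≤ PySem.Int.floordiv X (PySem.Int.floordiv X i)) :
    PySem.Int.floordiv X k = PySem.Int.floordiv X i := by
  set q := PySem.Int.floordiv X i with hq
  have hi : (0:Int) < i := by omega
  have hk : (0:Int) < k := by omega
  have hqpos : (0:Int) < q := by
    have h1 : (1:Int) ≤ PySem.Int.floordiv X i ↔ 1 * i ≤ X := PySem.Int.le_floordiv_iff_mul_le hi
    have := h1.mpr (by omega)
    omega
  have hlow : q ≤ PySem.Int.floordiv X k := by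
    have h1 : q ≤ PySem.Int.floordiv X k ↔ q * k ≤ X := PySem.Int.le_floordiv_iff_mul_le hk
    have h2' : k ≤ PySem.Int.floordiv X q ↔ k * q ≤ X := PySem.Int.le_floordiv_iff_mul_le hqpos
    have := h2'.mp hkj
    rw [h1]; linarith
  have hXlt : X < (q + 1) * i :=
    ((PySem.Int.floordiv_eq_iff_of_pos hi).mp hq.symm).2
  have hhigh : PySem.Int.floordiv X k ≤ q := by
    by_contra hcon
    have h1 : q + 1 ≤ PySem.Int.floordiv X k ↔ (q + 1) * k ≤ X := PySem.Int.le_floordiv_iff_mul_le hk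
    have h2' := h1.mp (by omega)
    have h3 : (q + 1) * i ≤ (q + 1) * k := mul_le_mul_of_nonneg_left hik (by omega)
    omega
  omega

-- a fold of constant terms over a block of equal quotients
theorem foldl_block (X q : Int) (l : List Int)
    (hconst : ∀ k ∈ l, PySem.Int.floordiv X k = q) : ∀ s : Int,
    l.foldl (fun acc k => acc + (PySem.Int.floordiv X k - 1)) s = s + (q - 1) * l.length := by
  induction l with
  | nil => intro s; simp
  | cons x t ih =>
    intro s
    have hx : PySem.Int.floordiv X x = q := hconst x (by simp)
    simp only [List.foldl_cons, hx, List.length_cons]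
    rw [ih (fun k hk => hconst k (by simp [hk]))]
    push_cast
    ring

-- A's block loop computes the linear divisor-quotient sum, for any sufficient fuel
theorem loop1_eq_scan (fuel : Nat) :
    ∀ (X i s : Int), 2 ≤ i → (X + 1 - i).toNat ≤ fuel →
    solveLoop1 fuel X i s =
      (PySem.List.pyRange i (X+1) 1).foldl (fun acc k => acc + (PySem.Int.floordiv X k - 1)) s := by
  induction fuel with
  | zero =>
    intro X i s h2 hf
    rw [PySem.List.pyRange_one_eq_nil (show X + 1 ≤ i by omega)]
    rfl
  | succ f ih =>
    intro X i s h2 hf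
    simp only [solveLoop1]
    split_ifs with h
    · set q := PySem.Int.floordiv X i with hq
      set j := PySem.Int.floordiv X q with hj
      have hi : (0:Int) < i := by omega
      have hqpos : (0:Int) < q := by
        have h1 : (1:Int) ≤ PySem.Int.floordiv X i ↔ 1 * i ≤ X := PySem.Int.le_floordiv_iff_mul_le hi
        have := h1.mpr (by omega)
        omega
      have hij : i ≤ j := by
        have h1 : i ≤ PySem.Int.floordiv X q ↔ i * q ≤ X := PySem.Int.le_floordiv_iff_mul_le hqpos
        have hd := PySem.Int.floordiv_mul_add_mod X i
        have hm : 0 ≤ PySem.Int.mod X i := by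
          rw [PySem.Int.mod_eq_emod_of_pos hi]; exact Int.emod_nonneg X (by omega)
        rw [hj, h1, hq]; nlinarith
      have hjX : j ≤ X := by
        have h1 : PySem.Int.floordiv X q < X + 1 ↔ X < (X + 1) * q := PySem.Int.floordiv_lt_iff_lt_mul hqpos
        have := h1.mpr (by nlinarith)
        omega
      rw [PySem.List.pyRange_one_append i (j+1) (X+1) (by omega) (by omega),
          List.foldl_append]
      rw [foldl_block X q _
          (by
            intro k hk
            rw [PySem.List.mem_pyRange_one] at hk
            exact floordiv_const_block X i k h2 h (by omega) (by rw [← hq, ← hj]; omega)) s]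
      have hlen : ((PySem.List.pyRange i (j+1) 1).length : Int) = j - i + 1 := by
        rw [PySem.List.length_pyRange_one]; omega
      rw [hlen]
      exact ih X (j+1) _ (by omega) (by omega)
    · rw [PySem.List.pyRange_one_eq_nil (show X + 1 ≤ i by omega)]
      rfl

-- B's increment loop computes Nat.sqrt
theorem sqrtLoop_eq (X : Int) (hX : 1 ≤ X) (fuel : Nat) :
    ∀ m : Int, 1 ≤ m → m ≤ (Nat.sqrt X.toNat : Int) →
    ((Nat.sqrt X.toNat : Int) - m).toNat ≤ fuel →
    solveAltSqrt fuel X m = (Nat.sqrt X.toNat : Int) := by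
  induction fuel with
  | zero =>
    intro m h1 h2 hf
    have : m = (Nat.sqrt X.toNat : Int) := by omega
    simp [solveAltSqrt, this]
  | succ f ih =>
    intro m h1 h2 hf
    simp only [solveAltSqrt]
    split_ifs with h
    · have hstep : m + 1 ≤ (Nat.sqrt X.toNat : Int) := by
        have hc : (m.toNat + 1) * (m.toNat + 1) ≤ X.toNat := by
          have hm : (m.toNat : Int) = m := Int.toNat_of_nonneg (by omega)
          have hx : (X.toNat : Int) = X := Int.toNat_of_nonneg (by omega)
          exact_mod_cast (by rw [hm, hx]; linarith : ((m.toNat + 1) * (m.toNat + 1) : Int) ≤ (X.toNat : Int))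
        have := Nat.le_sqrt.mpr hc
        omega
      exact ih (m+1) (by omega) hstep (by omega)
    · -- condition false forces m = sqrt
      have hlt : Nat.sqrt X.toNat < m.toNat + 1 := by
        rw [Nat.sqrt_lt]
        have hm : (m.toNat : Int) = m := Int.toNat_of_nonneg (by omega)
        by_contra hcon
        have : ((m.toNat + 1) * (m.toNat + 1) : Int) ≤ (X.toNat : Int) := by exact_mod_cast by omega
        rw [hm, Int.toNat_of_nonneg (by omega : (0:Int) ≤ X)] at this
        exact h (by linarith)
      omega

-- counting b ≥ 2 with a*b ≤ n
theorem count_inner (n a : Nat) (ha : 2 ≤ a) :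
    (∑ b ∈ Finset.Icc 2 n, if a * b ≤ n then 1 else 0) = n / a - 1 := by
  have hfilter : (Finset.Icc 2 n).filter (fun b => a * b ≤ n) = Finset.Icc 2 (n / a) := by
    ext b
    simp only [Finset.mem_filter, Finset.mem_Icc]
    constructor
    · rintro ⟨⟨hb2, _⟩, hab⟩
      exact ⟨hb2, (Nat.le_div_iff_mul_le (by omega)).mpr (by rw [Nat.mul_comm]; exact hab)⟩
    · rintro ⟨hb2, hbd⟩
      have h1 : b * a ≤ n := (Nat.le_div_iff_mul_le (by omega)).mp hbd
      have hbn : b ≤ n := le_trans (Nat.le_mul_of_pos_right b (by omega)) h1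
      exact ⟨⟨hb2, hbn⟩, by rw [Nat.mul_comm]; exact h1⟩
  calc (∑ b ∈ Finset.Icc 2 n, if a * b ≤ n then 1 else 0)
      = ((Finset.Icc 2 n).filter (fun b => a * b ≤ n)).card := (Finset.card_filter _ _).symm
    _ = (Finset.Icc 2 (n / a)).card := by rw [hfilter]
    _ = n / a - 1 := by rw [Nat.card_Icc]; omega

-- the hyperbola-symmetry identity, Nat version
theorem hyperbola (n : Nat) :
    (∑ a ∈ Finset.Icc 2 n, (n / a - 1)) + (Nat.sqrt n - 1)^2
      = 2 * ∑ a ∈ Finset.Icc 2 (Nat.sqrt n), (n / a - 1) := by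
  set m := Nat.sqrt n with hm
  by_cases hm2 : 2 ≤ m
  · have hmn : m ≤ n := Nat.sqrt_le_self n
    have hsplit : Finset.Icc 2 n = Finset.Icc 2 m ∪ Finset.Ioc m n := by
      ext x
      simp only [Finset.mem_Icc, Finset.mem_Ioc, Finset.mem_union]
      omega
    have hdisj : Disjoint (Finset.Icc 2 m) (Finset.Ioc m n) := by
      rw [Finset.disjoint_left]
      intro x hx hx'
      simp only [Finset.mem_Icc] at hx
      simp only [Finset.mem_Ioc] at hx'
      omega
    -- double-sum picture: χ(a,b) := if a*b ≤ n then 1 else 0 over [2,n]×[2,n]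
    -- every pair with a*b ≤ n has a ≤ m or b ≤ m, so the Ioc×Ioc quadrant vanishes
    have hquad : (∑ a ∈ Finset.Ioc m n, ∑ b ∈ Finset.Ioc m n, if a * b ≤ n then 1 else 0) = 0 := by
      apply Finset.sum_eq_zero
      intro a ha
      apply Finset.sum_eq_zero
      intro b hb
      simp only [Finset.mem_Ioc] at ha hb
      have h1 : n < (m+1) * (m+1) := by
        have := Nat.lt_succ_sqrt n
        simpa [Nat.succ_eq_add_one, hm] using this
      have h2 : (m+1) * (m+1) ≤ a * b := Nat.mul_le_mul (by omega) (by omega)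
      simp [Nat.not_le.mpr (by omega : n < a * b)]
    -- the diagonal m-quadrant is all ones
    have hdiag : (∑ a ∈ Finset.Icc 2 m, ∑ b ∈ Finset.Icc 2 m, if a * b ≤ n then 1 else 0)
        = (m - 1)^2 := by
      have : ∀ a ∈ Finset.Icc 2 m, (∑ b ∈ Finset.Icc 2 m, if a * b ≤ n then 1 else 0) = m - 1 := by
        intro a ha
        simp only [Finset.mem_Icc] at ha
        have : ∀ b ∈ Finset.Icc 2 m, (if a * b ≤ n then 1 else 0) = 1 := by
          intro b hb
          simp only [Finset.mem_Icc] at hb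
          have h1 : a * b ≤ m * m := Nat.mul_le_mul ha.2 hb.2
          have h2 : m * m ≤ n := by have := Nat.sqrt_le n; simpa [hm] using this
          simp [le_trans h1 h2]
        rw [Finset.sum_congr rfl this, Finset.sum_const, Nat.card_Icc, smul_eq_mul, Nat.mul_one]
        omega
      rw [Finset.sum_congr rfl this, Finset.sum_const, Nat.card_Icc, smul_eq_mul, pow_two]
      have hc : m + 1 - 2 = m - 1 := by omega
      rw [hc]
    -- full rows (as counts)
    have hrow : ∀ (A : Finset Nat), (∀ a ∈ A, 2 ≤ a) →
        (∑ a ∈ A, ∑ b ∈ Finset.Icc 2 n, if a * b ≤ n then 1 else 0)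
          = ∑ a ∈ A, (n / a - 1) := by
      intro A hA
      exact Finset.sum_congr rfl (fun a ha => count_inner n a (hA a ha))
    -- mixed column quadrant: sum over a ∈ [2,n], b ∈ [2,m] equals the row sum over [2,m] by symmetry
    have hcol : (∑ a ∈ Finset.Icc 2 n, ∑ b ∈ Finset.Icc 2 m, if a * b ≤ n then 1 else 0)
        = ∑ b ∈ Finset.Icc 2 m, (n / b - 1) := by
      rw [Finset.sum_comm]
      apply Finset.sum_congr rfl
      intro b hb
      simp only [Finset.mem_Icc] at hb
      calc (∑ a ∈ Finset.Icc 2 n, if a * b ≤ n then 1 else 0)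
          = ∑ a ∈ Finset.Icc 2 n, if b * a ≤ n then 1 else 0 := by
            apply Finset.sum_congr rfl; intro a _; rw [Nat.mul_comm]
        _ = n / b - 1 := count_inner n b hb.1
    -- expand the four quadrants
    have hexp : (∑ a ∈ Finset.Icc 2 n, ∑ b ∈ Finset.Icc 2 n, if a * b ≤ n then 1 else 0)
          + (∑ a ∈ Finset.Icc 2 m, ∑ b ∈ Finset.Icc 2 m, if a * b ≤ n then 1 else 0)
        = (∑ a ∈ Finset.Icc 2 m, ∑ b ∈ Finset.Icc 2 n, if a * b ≤ n then 1 else 0)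
          + (∑ a ∈ Finset.Icc 2 n, ∑ b ∈ Finset.Icc 2 m, if a * b ≤ n then 1 else 0) := by
      have inner_split : ∀ a : Nat, (∑ b ∈ Finset.Icc 2 n, if a * b ≤ n then 1 else 0)
          = (∑ b ∈ Finset.Icc 2 m, if a * b ≤ n then 1 else 0)
            + (∑ b ∈ Finset.Ioc m n, if a * b ≤ n then 1 else 0) := by
        intro a
        rw [hsplit, Finset.sum_union hdisj]
      simp only [inner_split]
      rw [hsplit]
      simp only [Finset.sum_union hdisj, Finset.sum_add_distrib]
      omega
    rw [hrow (Finset.Icc 2 n) (fun a ha => (Finset.mem_Icc.mp ha).1),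
        hrow (Finset.Icc 2 m) (fun a ha => (Finset.mem_Icc.mp ha).1)] at hexp
    rw [hdiag, hcol] at hexp
    omega
  · -- m ≤ 1 means n ≤ 3: every term n/a - 1 vanishes
    have hn3 : n ≤ 3 := by
      by_contra hcon
      have : 2 * 2 ≤ n := by omega
      have := Nat.le_sqrt.mpr this
      omega
    have hz : (∑ a ∈ Finset.Icc 2 n, (n / a - 1)) = 0 := by
      apply Finset.sum_eq_zero
      intro a ha
      simp only [Finset.mem_Icc] at ha
      have : n / a ≤ 1 := Nat.le_of_lt_succ (Nat.div_lt_of_lt_mul (by omega))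
      omega
    have hz2 : (∑ a ∈ Finset.Icc 2 m, (n / a - 1)) = 0 := by
      apply Finset.sum_eq_zero
      intro a ha
      simp only [Finset.mem_Icc] at ha
      omega
    rw [hz, hz2]
    have hz3 : m - 1 = 0 := by omega
    rw [hz3]
    norm_num

-- bridge: the Int fold over pyRange 2 (2+t) is the Nat Icc sum up to t+1
theorem bridge (X : Int) (hX : 1 ≤ X) : ∀ t : Nat, 2 + (t : Int) ≤ X + 1 →
    ((PySem.List.pyRange 2 (2 + (t : Int)) 1).map (fun k => PySem.Int.floordiv X k - 1)).sum
      = ((∑ a ∈ Finset.Icc 2 (t + 1), (X.toNat / a - 1) : Nat) : Int) := by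
  intro t
  induction t with
  | zero =>
    intro _
    rw [show (2 + ((0:Nat) : Int)) = 2 by norm_num, PySem.List.pyRange_one_eq_nil (by omega)]
    simp
  | succ u ih =>
    intro ht
    have hsplit : PySem.List.pyRange 2 (2 + ((u+1 : Nat) : Int)) 1
        = PySem.List.pyRange 2 (2 + ((u : Nat) : Int)) 1 ++ [2 + ((u : Nat) : Int)] := by
      have he : (2 + ((u+1 : Nat) : Int)) = (2 + ((u : Nat) : Int)) + 1 := by push_cast; ring
      rw [he]
      exact PySem.List.pyRange_one_succ_right (by omega)
    rw [hsplit, List.map_append, List.sum_append]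
    rw [ih (by push_cast at ht ⊢; omega)]
    have hdiv : 1 ≤ X.toNat / (u + 2) := by
      apply (Nat.one_le_div_iff (by omega)).mpr
      push_cast at ht
      omega
    have hterm : PySem.Int.floordiv X (2 + ((u : Nat) : Int)) - 1
        = ((X.toNat / (u + 2) - 1 : Nat) : Int) := by
      have h1 : PySem.Int.floordiv X (2 + ((u : Nat) : Int)) = ((X.toNat / (u + 2) : Nat) : Int) := by
        conv_lhs => rw [show X = ((X.toNat : Nat) : Int) from (Int.toNat_of_nonneg (by omega)).symm,
                        show (2 + ((u : Nat) : Int)) = ((u + 2 : Nat) : Int) by push_cast; ring]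
        exact PySem.Int.floordiv_natCast X.toNat (u + 2)
      rw [h1, Nat.cast_sub hdiv]
      norm_num
    have hsum : (∑ a ∈ Finset.Icc 2 (u + 1 + 1), (X.toNat / a - 1))
        = (∑ a ∈ Finset.Icc 2 (u + 1), (X.toNat / a - 1)) + (X.toNat / (u + 2) - 1) := by
      rw [Finset.sum_Icc_succ_top (by omega)]
    rw [hsum]
    simp only [List.map_cons, List.map_nil, List.sum_cons, List.sum_nil, hterm]
    push_cast
    ring

-- ===== VERDICT (by name: the statement is the Claim_ definition above) =====
theorem solve_spec : Claim_equal_solve := by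
  intro X N _ _
  unfold Spec_solve solve solve_alt
  rw [loop2_eq]
  congr 1
  rw [loop1_eq_scan (X+1).toNat X 2 0 (by omega) (by omega)]
  by_cases hX : 1 ≤ X
  · -- positive case: hyperbola identity
    have hm1 : 1 ≤ Nat.sqrt X.toNat := by
      have : 1 * 1 ≤ X.toNat := by omega
      have := Nat.le_sqrt.mpr this
      omega
    have hmn : Nat.sqrt X.toNat ≤ X.toNat := Nat.sqrt_le_self X.toNat
    have hM : solveAltSqrt (X.toNat + 1) X 1 = (Nat.sqrt X.toNat : Int) := by
      apply sqrtLoop_eq X hX _ 1 (by omega) (by exact_mod_cast hm1) (by omega)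
    rw [hM]
    rw [PySem.List.foldl_add, PySem.List.foldl_add]
    have hb1 := bridge X hX (X - 1).toNat (by omega)
    have hb2 := bridge X hX (Nat.sqrt X.toNat - 1) (by omega)
    rw [show (2 + ((X - 1).toNat : Int)) = X + 1 by omega] at hb1
    rw [show ((X - 1).toNat + 1) = X.toNat by omega] at hb1
    rw [show (2 + ((Nat.sqrt X.toNat - 1 : Nat) : Int)) = (Nat.sqrt X.toNat : Int) + 1 by omega] at hb2
    rw [show ((Nat.sqrt X.toNat - 1) + 1) = Nat.sqrt X.toNat by omega] at hb2
    rw [hb1, hb2]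
    have hhyp := hyperbola X.toNat
    have hsq : (((Nat.sqrt X.toNat - 1)^2 : Nat) : Int) = ((Nat.sqrt X.toNat : Int) - 1)^2 := by
      push_cast [Nat.cast_sub hm1]
      ring
    have hcast : ((∑ a ∈ Finset.Icc 2 X.toNat, (X.toNat / a - 1) : Nat) : Int)
          + (((Nat.sqrt X.toNat - 1)^2 : Nat) : Int)
        = 2 * ((∑ a ∈ Finset.Icc 2 (Nat.sqrt X.toNat), (X.toNat / a - 1) : Nat) : Int) := by
      exact_mod_cast congrArg (fun z : Nat => (z : Int)) hhyp
    rw [hsq] at hcast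
    linarith
  · -- X ≤ 0: both sides are 0
    have hr1 : PySem.List.pyRange 2 (X+1) 1 = [] := PySem.List.pyRange_one_eq_nil (by omega)
    have hM : solveAltSqrt (X.toNat + 1) X 1 = 1 := by
      have : X.toNat = 0 := by omega
      rw [this]
      simp only [solveAltSqrt]
      rw [if_neg (by omega)]
    rw [hM, hr1]
    have hr2 : PySem.List.pyRange 2 ((1:Int)+1) 1 = [] := PySem.List.pyRange_one_eq_nil (by omega)
    rw [hr2]
    simp
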